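-- pv_equiv track=rewrite | github.com/mlazic95/receiptScanning | data_extraction.py | findVendor
-- ===== SOURCE A (Python) =====
-- def findVendor(labels, words):
--   vendor = ''
--   for i in range(len(labels)):
--     if labels[i] == 'vendor':
--       vendor += words[i] + ' '
--     elif vendor != '':
--       return vendor[:-1]
--   return None
-- ===== SOURCE B (Python) =====
-- def findVendor(labels, words):
--     # boundary formulation: locate the first run of 'vendor' labels, then join its words.
--     start = next((i for i, lab in enumerate(labels) if lab == 'vendor'), None)
--     if start is None:
--         return None
--     end = start
--     while end < len(labels) and labels[end] == 'vendor':
--         end += 1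
--     return ' '.join(words[i] for i in range(start, end))
-- ===== Notes on version B (the rewrite author's own statement) =====
-- stated objective: alternative
-- what changed: Replaces A's accumulate-a-string-with-trailing-space-then-trim loop by a boundary formulation: find the first 'vendor' index, scan to the end of that run, and ' '.join the words of that index range.
-- intended difference: When the first run of 'vendor' labels extends to the end of labels, A falls out of its loop and returns None even though it found a vendor name; B returns the joined vendor words, which is the intended value. — e.g. on findVendor(["vendor"], ["ACME"]): A returns none, B returns some "ACME"
import Mathlib
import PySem

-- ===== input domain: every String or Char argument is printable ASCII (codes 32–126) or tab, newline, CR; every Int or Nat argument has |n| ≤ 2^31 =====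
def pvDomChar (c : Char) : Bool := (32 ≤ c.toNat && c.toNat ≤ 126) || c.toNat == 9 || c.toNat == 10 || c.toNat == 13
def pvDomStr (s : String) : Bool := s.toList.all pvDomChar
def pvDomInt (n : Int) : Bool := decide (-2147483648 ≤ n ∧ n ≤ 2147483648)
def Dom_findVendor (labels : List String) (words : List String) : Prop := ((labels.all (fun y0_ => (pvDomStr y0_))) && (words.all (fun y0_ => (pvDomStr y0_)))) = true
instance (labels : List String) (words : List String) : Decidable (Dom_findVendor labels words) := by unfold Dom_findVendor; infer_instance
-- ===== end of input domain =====

-- B replaces A's accumulate-in-a-loop with a boundary formulation (first 'vendor' run's start and end, then join the words); when that run reaches the end of labels A returns None and B returns the joined words (stated as D_ below); return value only.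


-- ===== PORT A =====
-- 'for i in range(len(labels)):' as structural recursion over the index list, state = vendor
def findVendorGoA (labels : List String) (words : List String) : List Nat → String → Option String
  | [], _ => none
  | i :: rest, vendor =>
    if labels.getD i "" = "vendor" then
      match words[i]? with
      | some w => findVendorGoA labels words rest (vendor ++ w ++ " ")
      | none => none   -- Python raises IndexError here; excluded by Pre_
    else if vendor ≠ "" then some (PySem.Str.slice vendor none (some (-1)))   -- vendor[:-1]
    else findVendorGoA labels words rest vendor

def findVendor (labels : List String) (words : List String) : Option String :=
  findVendorGoA labels words (List.range labels.length) ""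

-- ===== PORT B =====
-- "while end < len(labels) and labels[end] == 'vendor': end += 1" (fuel = enough iterations, structural)
def findVendorRunEnd (labels : List String) : Nat → Nat → Nat
  | 0, e => e
  | fuel + 1, e =>
    if h : e < labels.length then
      if labels[e] = "vendor" then findVendorRunEnd labels fuel (e + 1) else e
    else e

def findVendor_alt (labels : List String) (words : List String) : Option String :=
  match labels.findIdx? (· == "vendor") with
  | none => none
  | some s =>
    let e := findVendorRunEnd labels labels.length s
    match (List.range' s (e - s)).mapM (fun i => words[i]?) with
    | none => none   -- Python raises IndexError here; excluded by Pre_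
    | some ws => some (PySem.Str.join " " ws)   -- ' '.join(words[i] for i in range(start, end))

-- ===== PRECONDITION & SPEC =====
-- Pre_ excludes exactly the inputs on which both programs raise IndexError: some index i of the
-- first consecutive run of 'vendor' labels (closed form: labels[i] = 'vendor' and, before i, once
-- a label is 'vendor' every later label is too) with i ≥ len(words).
def Pre_findVendor (labels : List String) (words : List String) : Prop :=
  ∀ i, i < labels.length → labels.getD i "" = "vendor" →
    (∀ k, k < i → ∀ j, j < k → labels.getD j "" = "vendor" → labels.getD k "" = "vendor") →
    i < words.length
instance (labels : List String) (words : List String) : Decidable (Pre_findVendor labels words) := by unfold Pre_findVendor; infer_instance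

def pvWitness_findVendor : List String × List String := (["vendor", "total"], ["ACME", "7"])

-- When the first run of 'vendor' labels extends to the end of labels, A falls out of its loop and
-- returns None even though it found a vendor name; B returns the joined vendor words, the intended value.
def D_findVendor (labels : List String) (words : List String) : Prop :=
  "vendor" ∈ labels ∧
  ∀ j, j < labels.length → ∀ i, i < j →
    labels.getD i "" = "vendor" → labels.getD j "" = "vendor"
instance (labels : List String) (words : List String) : Decidable (D_findVendor labels words) := by unfold D_findVendor; infer_instance

def Spec_findVendor (labels : List String) (words : List String) (out : Option String) : Prop :=
  ¬ D_findVendor labels words → out = findVendor_alt labels words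
instance (labels : List String) (words : List String) (out : Option String) : Decidable (Spec_findVendor labels words out) := by unfold Spec_findVendor; infer_instance

def pvDiffWitness_findVendor : List String × List String := (["vendor"], ["ACME"])
def pvDiffWitnessOut_findVendor : (Option String) × (Option String) := (none, some "ACME")

-- ===== CLAIM (what is proved, stated in full; the proofs are below) =====
def Claim_unchanged_findVendor : Prop := ∀ (labels : List String) (words : List String), Dom_findVendor labels words → Pre_findVendor labels words → Spec_findVendor labels words (findVendor labels words)
def Claim_changed_findVendor : Prop := Dom_findVendor (pvDiffWitness_findVendor.1) (pvDiffWitness_findVendor.2) ∧ Pre_findVendor (pvDiffWitness_findVendor.1) (pvDiffWitness_findVendor.2) ∧ D_findVendor (pvDiffWitness_findVendor.1) (pvDiffWitness_findVendor.2) ∧ findVendor (pvDiffWitness_findVendor.1) (pvDiffWitness_findVendor.2) = pvDiffWitnessOut_findVendor.1 ∧ findVendor_alt (pvDiffWitness_findVendor.1) (pvDiffWitness_findVendor.2) = pvDiffWitnessOut_findVendor.2 ∧ pvDiffWitnessOut_findVendor.1 ≠ pvDiffWitnessOut_findVendor.2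
def Claim_exact_findVendor : Prop := ∀ (labels : List String) (words : List String), Dom_findVendor labels words → Pre_findVendor labels words → D_findVendor labels words → findVendor labels words ≠ findVendor_alt labels words

-- ===== LEMMAS AND PROOFS =====

-- one step of A's loop (definitional)
theorem findVendorGoA_cons (labels words : List String) (i : Nat) (rest : List Nat) (v : String) :
    findVendorGoA labels words (i :: rest) v =
      if labels.getD i "" = "vendor" then
        (match words[i]? with
         | some w => findVendorGoA labels words rest (v ++ w ++ " ")
         | none => none)
      else if v ≠ "" then some (PySem.Str.slice v none (some (-1)))
      else findVendorGoA labels words rest v := rfl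

-- run-end characterisation of B's while loop
theorem findVendorRunEnd_props (labels : List String) :
    ∀ fuel e, labels.length ≤ e + fuel → e ≤ labels.length →
      e ≤ findVendorRunEnd labels fuel e ∧
      findVendorRunEnd labels fuel e ≤ labels.length ∧
      (∀ j, e ≤ j → j < findVendorRunEnd labels fuel e → labels.getD j "" = "vendor") ∧
      (findVendorRunEnd labels fuel e < labels.length →
        labels.getD (findVendorRunEnd labels fuel e) "" ≠ "vendor") := by
  intro fuel
  induction fuel with
  | zero =>
    intro e h1 h2
    simp only [findVendorRunEnd]
    refine ⟨le_refl _, h2, ?_, ?_⟩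
    · intro j hj1 hj2; omega
    · intro hlt; exact absurd hlt (by omega)
  | succ fuel ih =>
    intro e h1 h2
    rcases Nat.lt_or_ge e labels.length with he | he
    · rcases eq_or_ne labels[e] "vendor" with hv | hv
      · have hrec : findVendorRunEnd labels (fuel + 1) e = findVendorRunEnd labels fuel (e + 1) := by
          simp [findVendorRunEnd, he, hv]
        obtain ⟨p1, p2, p3, p4⟩ := ih (e + 1) (by omega) (by omega)
        rw [hrec]
        refine ⟨by omega, p2, ?_, p4⟩
        intro j hj1 hj2
        rcases Nat.eq_or_lt_of_le hj1 with heq | hlt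
        · rw [← heq, List.getD_eq_getElem _ _ he]; exact hv
        · exact p3 j hlt hj2
      · have hrec : findVendorRunEnd labels (fuel + 1) e = e := by
          simp [findVendorRunEnd, he, hv]
        rw [hrec]
        refine ⟨le_refl _, h2, ?_, ?_⟩
        · intro j hj1 hj2; omega
        · intro _; rw [List.getD_eq_getElem _ _ he]; exact hv
    · have he' : ¬ e < labels.length := by omega
      have hrec : findVendorRunEnd labels (fuel + 1) e = e := by
        simp [findVendorRunEnd, he']
      rw [hrec]
      refine ⟨le_refl _, h2, ?_, ?_⟩
      · intro j hj1 hj2; omega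
      · intro hlt; exact absurd hlt (by omega)

-- A's loop returns none when no label is 'vendor' and the accumulator is empty
theorem findVendorGoA_none (labels words : List String)
    (h : ∀ x ∈ labels, x ≠ "vendor") :
    ∀ l : List Nat, findVendorGoA labels words l "" = none := by
  intro l
  induction l with
  | nil => rfl
  | cons i rest ih =>
    have hne : labels.getD i "" ≠ "vendor" := by
      by_cases hi : i < labels.length
      · rw [List.getD_eq_getElem _ _ hi]; exact h _ (labels.getElem_mem hi)
      · rw [List.getD_eq_default _ _ (by omega)]; simp
    rw [findVendorGoA_cons, if_neg hne, if_neg (by simp)]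
    exact ih

-- A's loop skips the prefix before the first 'vendor'
theorem findVendorGoA_skip (labels words : List String) (s : Nat) (hs : s ≤ labels.length)
    (hpre : ∀ j, j < s → labels.getD j "" ≠ "vendor") :
    ∀ i, i ≤ s →
      findVendorGoA labels words (List.range' i (labels.length - i)) "" =
      findVendorGoA labels words (List.range' s (labels.length - s)) "" := by
  intro i hi
  induction hms : s - i generalizing i with
  | zero => have : i = s := by omega
            subst this; rfl
  | succ m ih =>
    have hilt : i < s := by omega
    have hrange : labels.length - i = (labels.length - (i + 1)) + 1 := by omega
    rw [hrange, List.range'_succ, findVendorGoA_cons, if_neg (hpre i hilt), if_neg (by simp)]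
    exact ih (i + 1) (by omega) (by omega)

-- A's loop inside the run [i, e): accumulates, then returns accumulator[:-1] (or none at the end)
theorem findVendorGoA_run (labels words : List String) (s e : Nat)
    (he : e ≤ labels.length)
    (hrun : ∀ j, s ≤ j → j < e → labels.getD j "" = "vendor")
    (hstop : e < labels.length → labels.getD e "" ≠ "vendor")
    (hw : ∀ j, s ≤ j → j < e → j < words.length) :
    ∀ m i v, e - i ≤ m → s ≤ i → i ≤ e → (i = e → e < labels.length → v ≠ "") →
      findVendorGoA labels words (List.range' i (labels.length - i)) v =
        if e = labels.length then none
        else some (PySem.Str.slice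
          (List.foldl (fun acc j => acc ++ words.getD j "" ++ " ") v (List.range' i (e - i)))
          none (some (-1))) := by
  intro m
  induction m with
  | zero =>
    intro i v hm hsi hie hv
    have hieq : i = e := by omega
    subst hieq
    by_cases hen : i = labels.length
    · rw [if_pos hen, show labels.length - i = 0 by omega, List.range'_zero]
      rfl
    · have hilt : i < labels.length := by omega
      have hrange : labels.length - i = (labels.length - (i + 1)) + 1 := by omega
      rw [if_neg hen, hrange, List.range'_succ, findVendorGoA_cons, if_neg (hstop hilt),
        if_pos (hv rfl hilt), Nat.sub_self, List.range'_zero]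
      rfl
  | succ m ih =>
    intro i v hm hsi hie hv
    by_cases hieq : i = e
    · subst hieq
      by_cases hen : i = labels.length
      · rw [if_pos hen, show labels.length - i = 0 by omega, List.range'_zero]
        rfl
      · have hilt : i < labels.length := by omega
        have hrange : labels.length - i = (labels.length - (i + 1)) + 1 := by omega
        rw [if_neg hen, hrange, List.range'_succ, findVendorGoA_cons, if_neg (hstop hilt),
          if_pos (hv rfl hilt), Nat.sub_self, List.range'_zero]
        rfl
    · have hilt : i < e := by omega
      have hiln : i < labels.length := by omega
      have hveni := hrun i hsi hilt
      have hwi : i < words.length := hw i hsi hilt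
      have hgetw : words[i]? = some (words.getD i "") := by
        rw [List.getElem?_eq_getElem hwi, List.getD_eq_getElem _ _ hwi]
      have hrange : labels.length - i = (labels.length - (i + 1)) + 1 := by omega
      rw [hrange, List.range'_succ, findVendorGoA_cons, if_pos hveni, hgetw]
      show findVendorGoA labels words (List.range' (i + 1) (labels.length - (i + 1)))
        (v ++ words.getD i "" ++ " ") = _
      rw [ih (i + 1) (v ++ words.getD i "" ++ " ") (by omega) (by omega) (by omega)
        (by intro _ _ hcon
            have hlist : (v ++ words.getD i "" ++ " ").toList = ([] : List Char) := by
              rw [hcon]; rfl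
            simp [String.toList_append] at hlist)]
      have hrange2 : e - i = (e - (i + 1)) + 1 := by omega
      rw [hrange2, List.range'_succ]
      rfl

-- mapM over in-range indices succeeds and yields the getD values
theorem mapM_getElem?_eq (words : List String) :
    ∀ l : List Nat, (∀ i ∈ l, i < words.length) →
      l.mapM (fun i => words[i]?) = some (l.map (fun i => words.getD i "")) := by
  intro l
  induction l with
  | nil => intro _; rfl
  | cons i rest ih =>
    intro h
    have hi : i < words.length := h i (by simp)
    have hsome : words[i]? = some (words.getD i "") := by
      rw [List.getElem?_eq_getElem hi, List.getD_eq_getElem _ _ hi]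
    rw [List.mapM_cons, hsome, ih (fun j hj => h j (by simp [hj]))]
    rfl

-- dropping the trailing space from the concatenation of "w + ' '" blocks is ' '.join (char level)
theorem dropLast_blocks_eq_join (ws : List String) (hne : ws ≠ []) :
    ((ws.map (fun w => w.toList ++ [' '])).flatten).dropLast =
      PySem.Chars.join [' '] (ws.map String.toList) := by
  induction ws with
  | nil => exact absurd rfl hne
  | cons w rest ih =>
    cases rest with
    | nil => simp [PySem.Chars.join_singleton]
    | cons w' rest' =>
      have hfl : ((w' :: rest').map (fun w => w.toList ++ [' '])).flatten ≠ [] := by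
        simp
      rw [List.map_cons, List.flatten_cons, List.dropLast_append_of_ne_nil hfl, ih (by simp)]
      simp only [List.map_cons]
      rw [PySem.Chars.join_cons_cons]

-- the accumulator of A's run loop, at char level
theorem foldl_append_toList (ws : List String) :
    ∀ v : String, (ws.foldl (fun acc w => acc ++ w ++ " ") v).toList =
      v.toList ++ (ws.map (fun w => w.toList ++ [' '])).flatten := by
  induction ws with
  | nil => intro v; simp
  | cons w rest ih =>
    intro v
    rw [List.foldl_cons, ih, String.toList_append, String.toList_append]
    simp

-- string level: accumulator[:-1] = ' '.join ws
theorem slice_foldl_eq_join (ws : List String) (hne : ws ≠ []) :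
    PySem.Str.slice (ws.foldl (fun acc w => acc ++ w ++ " ") "") none (some (-1)) =
      PySem.Str.join " " ws := by
  apply String.toList_inj.mp
  rw [PySem.Str.slice_to_neg_one, PySem.Str.toList_join, foldl_append_toList]
  simpa using dropLast_blocks_eq_join ws hne

-- ===== VERDICT (by name: the statements are the Claim_ definitions above) =====
theorem findVendor_spec : Claim_unchanged_findVendor := by
  intro labels words _hdom hpre
  unfold Spec_findVendor findVendor
  intro hnd
  cases hidx : labels.findIdx? (· == "vendor") with
  | none =>
    have hall : ∀ x ∈ labels, x ≠ "vendor" := by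
      intro x hx
      have := List.findIdx?_eq_none_iff.mp hidx x hx
      simpa using this
    have hB : findVendor_alt labels words = none := by
      unfold findVendor_alt
      rw [hidx]
    rw [hB, findVendorGoA_none labels words hall]
  | some s =>
    obtain ⟨e, hE⟩ : ∃ x, findVendorRunEnd labels labels.length s = x := ⟨_, rfl⟩
    obtain ⟨hslt, hvs, hmin⟩ := List.findIdx?_eq_some_iff_getElem.mp hidx
    have hvs' : labels[s] = "vendor" := by simpa using hvs
    have hmin' : ∀ j, j < s → labels.getD j "" ≠ "vendor" := by
      intro j hj
      rw [List.getD_eq_getElem _ _ (by omega)]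
      have := hmin j hj
      simpa using this
    obtain ⟨p1, p2, p3, p4⟩ :=
      findVendorRunEnd_props labels labels.length s (by omega) (by omega)
    rw [hE] at p1 p2 p3 p4
    have hse : s < e := by
      rcases Nat.eq_or_lt_of_le p1 with heq | h
      · exfalso
        exact p4 (by omega) (by rw [← heq, List.getD_eq_getElem _ _ hslt]; exact hvs')
      · exact h
    -- ¬ D_ rules out the run-reaches-the-end case
    have hen : e ≠ labels.length := by
      intro heq
      apply hnd
      refine ⟨by rw [← hvs']; exact labels.getElem_mem hslt, ?_⟩
      intro j hj i hij hvi
      have hsi : s ≤ i := by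
        by_contra hcon
        exact hmin' i (by omega) hvi
      exact p3 j (by omega) (by omega)
    have hw : ∀ j, s ≤ j → j < e → j < words.length := by
      intro j hj1 hj2
      refine hpre j (by omega) (p3 j hj1 hj2) ?_
      intro k hk j' hj' hvj'
      have hsj' : s ≤ j' := by
        by_contra hcon
        exact hmin' j' (by omega) hvj'
      exact p3 k (by omega) (by omega)
    have hB : findVendor_alt labels words =
        match (List.range' s (e - s)).mapM (fun i => words[i]?) with
          | none => none
          | some ws => some (PySem.Str.join " " ws) := by
      unfold findVendor_alt
      rw [hidx]
      show (match (List.range' s (findVendorRunEnd labels labels.length s - s)).mapM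
            (fun i => words[i]?) with
          | none => none
          | some ws => some (PySem.Str.join " " ws)) = _
      rw [hE]
    have hA : findVendorGoA labels words (List.range labels.length) "" =
        if e = labels.length then none
        else some (PySem.Str.slice
          (List.foldl (fun acc j => acc ++ words.getD j "" ++ " ") "" (List.range' s (e - s)))
          none (some (-1))) := by
      rw [List.range_eq_range', show labels.length = labels.length - 0 from rfl,
        findVendorGoA_skip labels words s (by omega) hmin' 0 (by omega)]
      exact findVendorGoA_run labels words s e (by omega) p3 p4 hw (e - s) s ""
        (le_refl _) (le_refl _) (by omega) (by intro h _; omega)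
    rw [hA, hB]
    have hmapM := mapM_getElem?_eq words (List.range' s (e - s))
      (by intro i hi
          have := List.mem_range'_1.mp hi
          exact hw i this.1 (by omega))
    rw [if_neg hen, hmapM]
    have hfold : List.foldl (fun acc j => acc ++ words.getD j "" ++ " ") ""
          (List.range' s (e - s)) =
        ((List.range' s (e - s)).map (fun i => words.getD i "")).foldl
          (fun acc w => acc ++ w ++ " ") "" := by
      rw [List.foldl_map]
    have hwsne : (List.range' s (e - s)).map (fun i => words.getD i "") ≠ [] := by
      intro hcon
      have hlen : ((List.range' s (e - s)).map (fun i => words.getD i "")).length = 0 := by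
        rw [hcon]; rfl
      simp at hlen; omega
    rw [hfold, slice_foldl_eq_join _ hwsne]

theorem findVendor_changed : Claim_changed_findVendor := by
  unfold Claim_changed_findVendor; decide

theorem findVendor_tight : Claim_exact_findVendor := by
  intro labels words _hdom hpre hd
  obtain ⟨hmem, hmono⟩ := hd
  cases hidx : labels.findIdx? (· == "vendor") with
  | none =>
    exfalso
    have := List.findIdx?_eq_none_iff.mp hidx "vendor" hmem
    simp at this
  | some s =>
    obtain ⟨e, hE⟩ : ∃ x, findVendorRunEnd labels labels.length s = x := ⟨_, rfl⟩
    obtain ⟨hslt, hvs, hmin⟩ := List.findIdx?_eq_some_iff_getElem.mp hidx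
    have hvs' : labels[s] = "vendor" := by simpa using hvs
    have hmin' : ∀ j, j < s → labels.getD j "" ≠ "vendor" := by
      intro j hj
      rw [List.getD_eq_getElem _ _ (by omega)]
      have := hmin j hj
      simpa using this
    obtain ⟨p1, p2, p3, p4⟩ :=
      findVendorRunEnd_props labels labels.length s (by omega) (by omega)
    rw [hE] at p1 p2 p3 p4
    have hse : s < e := by
      rcases Nat.eq_or_lt_of_le p1 with heq | h
      · exfalso
        exact p4 (by omega) (by rw [← heq, List.getD_eq_getElem _ _ hslt]; exact hvs')
      · exact h
    -- D_ forces the run to reach the end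
    have hen : e = labels.length := by
      by_contra hcon
      have helt : e < labels.length := by omega
      exact p4 helt (hmono e helt s hse (by rw [List.getD_eq_getElem _ _ hslt]; exact hvs'))
    have hw : ∀ j, s ≤ j → j < e → j < words.length := by
      intro j hj1 hj2
      refine hpre j (by omega) (p3 j hj1 hj2) ?_
      intro k hk j' hj' hvj'
      have hsj' : s ≤ j' := by
        by_contra hcon
        exact hmin' j' (by omega) hvj'
      exact p3 k (by omega) (by omega)
    -- A returns none
    have hA : findVendor labels words = none := by
      unfold findVendor
      rw [List.range_eq_range', show labels.length = labels.length - 0 from rfl,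
        findVendorGoA_skip labels words s (by omega) hmin' 0 (by omega),
        findVendorGoA_run labels words s e (by omega) p3 p4 hw (e - s) s ""
          (le_refl _) (le_refl _) (by omega) (by intro h _; omega),
        if_pos hen]
    -- B returns some join
    have hmapM := mapM_getElem?_eq words (List.range' s (e - s))
      (by intro i hi
          have := List.mem_range'_1.mp hi
          exact hw i this.1 (by omega))
    have hB : findVendor_alt labels words =
        some (PySem.Str.join " " ((List.range' s (e - s)).map (fun i => words.getD i ""))) := by
      unfold findVendor_alt
      rw [hidx]
      show (match (List.range' s (findVendorRunEnd labels labels.length s - s)).mapM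
            (fun i => words[i]?) with
          | none => none
          | some ws => some (PySem.Str.join " " ws)) = _
      rw [hE, hmapM]
    rw [hA, hB]
    simp
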